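-- pv_equiv track=rewrite | github.com/murdok1982/SistemaChitauri | backend/app/services/intel_fusion.py | _derive_classification
-- ===== SOURCE A (Python) =====
-- from typing import Any, Literal
--
-- def _derive_classification(events: list[dict[str, Any]]) -> str:
--     """Use the highest classification level present in the input events."""
--     levels = {
--         "UNCLASSIFIED": 0,
--         "RESTRICTED": 1,
--         "CONFIDENTIAL": 2,
--         "SECRET": 3,
--         "TOP_SECRET": 4,
--     }
--     highest = "UNCLASSIFIED"
--     for event in events:
--         lvl = event.get("classification", event.get("classification_level", "UNCLASSIFIED")).upper()
--         if levels.get(lvl, 0) > levels.get(highest, 0):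
--             highest = lvl
--     return highest
-- ===== SOURCE B (Python) =====
-- def _derive_classification(events):
--     """Use the highest classification level present in the input events."""
--     present = {
--         event.get("classification", event.get("classification_level", "UNCLASSIFIED")).upper()
--         for event in events
--     }
--     for name in ("TOP_SECRET", "SECRET", "CONFIDENTIAL", "RESTRICTED"):
--         if name in present:
--             return name
--     return "UNCLASSIFIED"
-- ===== Notes on version B (the rewrite author's own statement) =====
-- stated objective: idiomatic
-- what changed: Replaces the running-max fold with rank table by a one-pass set of present (uppercased) levels followed by a fixed highest-to-lowest priority scan returning the first level present.
import Mathlib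
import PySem

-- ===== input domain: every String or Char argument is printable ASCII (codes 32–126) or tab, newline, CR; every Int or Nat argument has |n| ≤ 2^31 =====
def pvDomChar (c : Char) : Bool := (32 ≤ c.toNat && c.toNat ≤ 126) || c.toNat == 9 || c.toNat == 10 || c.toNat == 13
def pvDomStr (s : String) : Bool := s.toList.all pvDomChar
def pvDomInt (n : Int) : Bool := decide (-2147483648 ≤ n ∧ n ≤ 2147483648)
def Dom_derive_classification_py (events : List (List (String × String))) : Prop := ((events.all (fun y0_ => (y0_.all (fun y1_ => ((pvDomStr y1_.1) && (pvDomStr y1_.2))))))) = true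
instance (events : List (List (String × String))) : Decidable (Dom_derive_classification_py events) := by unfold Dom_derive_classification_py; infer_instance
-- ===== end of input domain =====

-- B replaces the running-max fold over a rank table by a set of the present (uppercased)
-- levels plus a fixed highest-to-lowest priority scan; same cost, more idiomatic.

-- ===== PORT A =====
-- shared helper: event.get("classification", event.get("classification_level", "UNCLASSIFIED")).upper()
def pvLvl (event : List (String × String)) : String :=
  PySem.Str.upper (((PySem.Dict.mk event).get? "classification").getD
    (((PySem.Dict.mk event).get? "classification_level").getD "UNCLASSIFIED"))

def derive_classification_py (events : List (List (String × String))) : String :=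
  let levels : PySem.Dict String Int :=
    PySem.Dict.ofList [("UNCLASSIFIED", 0), ("RESTRICTED", 1), ("CONFIDENTIAL", 2),
                       ("SECRET", 3), ("TOP_SECRET", 4)]
  events.foldl (fun highest event =>
    let lvl := pvLvl event
    if levels.getD lvl 0 > levels.getD highest 0 then lvl else highest) "UNCLASSIFIED"

-- ===== PORT B =====
def derive_classification_py_alt (events : List (List (String × String))) : String :=
  let present : PySem.Set String := PySem.Set.ofList (events.map (fun event => pvLvl event))
  if "TOP_SECRET" ∈ present then "TOP_SECRET"
  else if "SECRET" ∈ present then "SECRET"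
  else if "CONFIDENTIAL" ∈ present then "CONFIDENTIAL"
  else if "RESTRICTED" ∈ present then "RESTRICTED"
  else "UNCLASSIFIED"

-- ===== PRECONDITION & SPEC =====
def Spec_derive_classification_py (events : List (List (String × String))) (out : String) : Prop := out = derive_classification_py_alt events
instance (events : List (List (String × String))) (out : String) : Decidable (Spec_derive_classification_py events out) := by unfold Spec_derive_classification_py; infer_instance

-- ===== CLAIM (what is proved, stated in full; the proofs are below) =====
def Claim_equal_derive_classification_py : Prop := ∀ (events : List (List (String × String))), Dom_derive_classification_py events → Spec_derive_classification_py events (derive_classification_py events)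

-- ===== LEMMAS AND PROOFS =====

-- proof-side rank = A's levels.get(s, 0)
def pvRank (s : String) : Int :=
  (PySem.Dict.ofList [("UNCLASSIFIED", (0:Int)), ("RESTRICTED", 1), ("CONFIDENTIAL", 2),
                      ("SECRET", 3), ("TOP_SECRET", 4)]).getD s 0

-- proof-side form of B's priority scan, over plain list membership
def pvScan (ls : List String) : String :=
  if "TOP_SECRET" ∈ ls then "TOP_SECRET"
  else if "SECRET" ∈ ls then "SECRET"
  else if "CONFIDENTIAL" ∈ ls then "CONFIDENTIAL"
  else if "RESTRICTED" ∈ ls then "RESTRICTED"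
  else "UNCLASSIFIED"

lemma rvT : pvRank "TOP_SECRET" = 4 := by decide
lemma rvS : pvRank "SECRET" = 3 := by decide
lemma rvC : pvRank "CONFIDENTIAL" = 2 := by decide
lemma rvR : pvRank "RESTRICTED" = 1 := by decide
lemma rvU : pvRank "UNCLASSIFIED" = 0 := by decide

lemma pvRank_cases (s : String) :
    s = "TOP_SECRET" ∨ s = "SECRET" ∨ s = "CONFIDENTIAL" ∨ s = "RESTRICTED" ∨ pvRank s = 0 := by
  by_cases h1 : s = "TOP_SECRET"; · exact Or.inl h1
  by_cases h2 : s = "SECRET"; · exact Or.inr (Or.inl h2)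
  by_cases h3 : s = "CONFIDENTIAL"; · exact Or.inr (Or.inr (Or.inl h3))
  by_cases h4 : s = "RESTRICTED"; · exact Or.inr (Or.inr (Or.inr (Or.inl h4)))
  by_cases h5 : s = "UNCLASSIFIED"
  · subst h5; right; right; right; right; decide
  · right; right; right; right
    have b1 : ("TOP_SECRET" == s) = false := by simpa using (Ne.symm h1)
    have b2 : ("SECRET" == s) = false := by simpa using (Ne.symm h2)
    have b3 : ("CONFIDENTIAL" == s) = false := by simpa using (Ne.symm h3)
    have b4 : ("RESTRICTED" == s) = false := by simpa using (Ne.symm h4)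
    have b5 : ("UNCLASSIFIED" == s) = false := by simpa using (Ne.symm h5)
    have hmk : (PySem.Dict.ofList [("UNCLASSIFIED", (0:Int)), ("RESTRICTED", 1),
        ("CONFIDENTIAL", 2), ("SECRET", 3), ("TOP_SECRET", 4)])
        = PySem.Dict.mk [("UNCLASSIFIED", (0:Int)), ("RESTRICTED", 1), ("CONFIDENTIAL", 2),
            ("SECRET", 3), ("TOP_SECRET", 4)] := by decide
    simp [pvRank, hmk, PySem.Dict.getD, b1, b2, b3, b4, b5, PySem.Dict.get?]

lemma pvRank_nonneg (s : String) : 0 ≤ pvRank s := by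
  rcases pvRank_cases s with e|e|e|e|e <;> first | (subst e; decide) | omega

lemma pvRank_inj (a b : String) (ha : 1 ≤ pvRank a) (h : pvRank a = pvRank b) : a = b := by
  rcases pvRank_cases a with e|e|e|e|e <;> rcases pvRank_cases b with f|f|f|f|f <;>
    first
      | (subst e; subst f; rfl)
      | (exfalso; simp_all [rvT, rvS, rvC, rvR])

lemma pvScan_mem (t : List String) :
    pvScan t = "TOP_SECRET" ∨ pvScan t = "SECRET" ∨ pvScan t = "CONFIDENTIAL" ∨
      pvScan t = "RESTRICTED" ∨ pvScan t = "UNCLASSIFIED" := by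
  unfold pvScan; split_ifs <;> simp

lemma pvScanT_mem (t : List String) (h : pvScan t = "TOP_SECRET") : "TOP_SECRET" ∈ t := by
  unfold pvScan at h; split_ifs at h <;> simp_all

lemma pvScanS_mem (t : List String) (h : pvScan t = "SECRET") : "SECRET" ∈ t := by
  unfold pvScan at h; split_ifs at h <;> simp_all

lemma pvScanC_mem (t : List String) (h : pvScan t = "CONFIDENTIAL") : "CONFIDENTIAL" ∈ t := by
  unfold pvScan at h; split_ifs at h <;> simp_all

lemma pvScan_cons (l : String) (t : List String) :
    pvScan (l :: t) = if pvRank l > pvRank (pvScan t) then l else pvScan t := by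
  rcases pvRank_cases l with h|h|h|h|h
  · -- l = "TOP_SECRET"
    subst h
    by_cases hT : "TOP_SECRET" ∈ t
    · have e : pvScan t = "TOP_SECRET" := by simp [pvScan, hT]
      rw [e]; simp [pvScan]
    · have hlt : pvRank (pvScan t) < 4 := by
        rcases pvScan_mem t with e|e|e|e|e
        · exact absurd (pvScanT_mem t e) hT
        all_goals rw [e]; decide
      rw [if_pos (by rw [rvT]; omega)]; simp [pvScan]
  · -- l = "SECRET"
    subst h
    by_cases hT : "TOP_SECRET" ∈ t
    · have e : pvScan t = "TOP_SECRET" := by simp [pvScan, hT]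
      rw [e, rvS, rvT]; simp [pvScan, hT]
    · by_cases hS : "SECRET" ∈ t
      · have e : pvScan t = "SECRET" := by simp [pvScan, hT, hS]
        rw [e, rvS]; simp [pvScan, hT, hS]
      · have hlt : pvRank (pvScan t) < 3 := by
          rcases pvScan_mem t with e|e|e|e|e
          · exact absurd (pvScanT_mem t e) hT
          · exact absurd (pvScanS_mem t e) hS
          all_goals rw [e]; decide
        rw [if_pos (by rw [rvS]; omega)]; simp [pvScan, hT, hS]
  · -- l = "CONFIDENTIAL"
    subst h
    by_cases hT : "TOP_SECRET" ∈ t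
    · have e : pvScan t = "TOP_SECRET" := by simp [pvScan, hT]
      rw [e, rvC, rvT]; simp [pvScan, hT]
    · by_cases hS : "SECRET" ∈ t
      · have e : pvScan t = "SECRET" := by simp [pvScan, hT, hS]
        rw [e, rvC, rvS]; simp [pvScan, hT, hS]
      · by_cases hC : "CONFIDENTIAL" ∈ t
        · have e : pvScan t = "CONFIDENTIAL" := by simp [pvScan, hT, hS, hC]
          rw [e, rvC]; simp [pvScan, hT, hS, hC]
        · have hlt : pvRank (pvScan t) < 2 := by
            rcases pvScan_mem t with e|e|e|e|e
            · exact absurd (pvScanT_mem t e) hT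
            · exact absurd (pvScanS_mem t e) hS
            · exact absurd (pvScanC_mem t e) hC
            all_goals rw [e]; decide
          rw [if_pos (by rw [rvC]; omega)]; simp [pvScan, hT, hS, hC]
  · -- l = "RESTRICTED"
    subst h
    by_cases hT : "TOP_SECRET" ∈ t
    · have e : pvScan t = "TOP_SECRET" := by simp [pvScan, hT]
      rw [e, rvR, rvT]; simp [pvScan, hT]
    · by_cases hS : "SECRET" ∈ t
      · have e : pvScan t = "SECRET" := by simp [pvScan, hT, hS]
        rw [e, rvR, rvS]; simp [pvScan, hT, hS]
      · by_cases hC : "CONFIDENTIAL" ∈ t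
        · have e : pvScan t = "CONFIDENTIAL" := by simp [pvScan, hT, hS, hC]
          rw [e, rvR, rvC]; simp [pvScan, hT, hS, hC]
        · by_cases hR : "RESTRICTED" ∈ t
          · have e : pvScan t = "RESTRICTED" := by simp [pvScan, hT, hS, hC, hR]
            rw [e, rvR]; simp [pvScan, hT, hS, hC, hR]
          · have e : pvScan t = "UNCLASSIFIED" := by simp [pvScan, hT, hS, hC, hR]
            rw [if_pos (by rw [e, rvR, rvU]; omega)]
            simp [pvScan, hT, hS, hC, hR]
  · -- pvRank l = 0 : l is none of the four scanned names
    have n1 : "TOP_SECRET" ≠ l := fun e => by rw [← e, rvT] at h; omega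
    have n2 : "SECRET" ≠ l := fun e => by rw [← e, rvS] at h; omega
    have n3 : "CONFIDENTIAL" ≠ l := fun e => by rw [← e, rvC] at h; omega
    have n4 : "RESTRICTED" ≠ l := fun e => by rw [← e, rvR] at h; omega
    rw [if_neg (by have := pvRank_nonneg (pvScan t); omega)]
    simp [pvScan, List.mem_cons, n1, n2, n3, n4]

lemma pv_fold_eq_scan (ls : List String) (h0 : String) :
    ls.foldl (fun h l => if pvRank l > pvRank h then l else h) h0
      = if pvRank (pvScan ls) > pvRank h0 then pvScan ls else h0 := by
  induction ls generalizing h0 with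
  | nil =>
    have : pvScan ([] : List String) = "UNCLASSIFIED" := by simp [pvScan]
    rw [List.foldl_nil, this, rvU, if_neg (by have := pvRank_nonneg h0; omega)]
  | cons l t ih =>
    rw [List.foldl_cons, ih, pvScan_cons]
    by_cases c2 : pvRank l > pvRank (pvScan t)
    · rw [if_pos c2]
      by_cases c1 : pvRank l > pvRank h0
      · rw [if_pos c1, if_neg (by omega)]
      · rw [if_neg c1, if_neg (by omega)]
    · rw [if_neg c2]
      by_cases c1 : pvRank l > pvRank h0
      · rw [if_pos c1]
        by_cases c3 : pvRank (pvScan t) > pvRank l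
        · rw [if_pos c3, if_pos (by omega)]
        · have heq : pvRank l = pvRank (pvScan t) := by omega
          have hl1 : 1 ≤ pvRank l := by have := pvRank_nonneg h0; omega
          have hls : l = pvScan t := pvRank_inj l (pvScan t) hl1 heq
          rw [if_neg c3, ← hls, if_pos c1]
      · rw [if_neg c1]

lemma pvA_eq (events : List (List (String × String))) :
    derive_classification_py events
      = (events.map pvLvl).foldl (fun h l => if pvRank l > pvRank h then l else h)
          "UNCLASSIFIED" := by
  unfold derive_classification_py
  rw [List.foldl_map]
  rfl

lemma pvB_eq (events : List (List (String × String))) :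
    derive_classification_py_alt events = pvScan (events.map pvLvl) := by
  simp only [derive_classification_py_alt, pvScan, PySem.Set.mem_ofList]

-- ===== VERDICT (by name: the statement is the Claim_ definition above) =====
theorem derive_classification_py_spec : Claim_equal_derive_classification_py := by
  intro events _
  unfold Spec_derive_classification_py
  rw [pvA_eq, pvB_eq, pv_fold_eq_scan]
  rcases pvScan_mem (events.map pvLvl) with e|e|e|e|e <;>
    rw [e, rvU] <;> simp [rvT, rvS, rvC, rvR]
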